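-- pv_equiv track=rewrite | github.com/azorel/multi_llm | src/self_healing/error_detector.py | _signature_matches
-- ===== SOURCE A (Python) =====
-- def _signature_matches(error_sig: str, pattern_sig: str) -> bool:
--     """Check if an error signature matches a pattern signature."""
--     error_parts = error_sig.split('|')
--     pattern_parts = pattern_sig.split('|')
--
--     if len(error_parts) != len(pattern_parts):
--         return False
--
--     for error_part, pattern_part in zip(error_parts, pattern_parts):
--         if pattern_part != '*' and error_part != pattern_part:
--             return False
--
--     return True
-- ===== SOURCE B (Python) =====
-- def _signature_matches(error_sig: str, pattern_sig: str) -> bool: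
--     """Check if an error signature matches a pattern signature.
--
--     Walks both strings segment by segment with str.partition, never
--     building the full lists of parts."""
--     e, p = error_sig, pattern_sig
--     while True:
--         eseg, esep, e = e.partition('|')
--         pseg, psep, p = p.partition('|')
--         if pseg != '*' and eseg != pseg:
--             return False
--         if esep != psep:
--             return False
--         if not esep:
--             return True
-- ===== Notes on version B (the rewrite author's own statement) =====
-- stated objective: alternative
-- what changed: Replaces split-into-lists + length check + positional zip loop by a single segment-by-segment walk over both strings with str.partition, which fails early and never materialises the part lists.
import Mathlib
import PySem

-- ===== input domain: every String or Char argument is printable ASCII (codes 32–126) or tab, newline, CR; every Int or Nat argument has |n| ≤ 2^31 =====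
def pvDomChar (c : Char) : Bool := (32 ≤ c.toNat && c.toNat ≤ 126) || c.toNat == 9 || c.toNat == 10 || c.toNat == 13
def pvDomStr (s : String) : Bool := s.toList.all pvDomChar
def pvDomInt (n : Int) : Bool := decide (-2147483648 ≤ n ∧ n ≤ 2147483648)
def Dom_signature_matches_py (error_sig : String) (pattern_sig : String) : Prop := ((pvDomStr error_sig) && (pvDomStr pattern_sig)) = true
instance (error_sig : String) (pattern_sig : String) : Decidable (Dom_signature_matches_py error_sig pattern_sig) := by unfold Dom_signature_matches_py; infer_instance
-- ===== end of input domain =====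

-- B replaces split-into-lists + length check + zip loop by a segment-by-segment walk
-- over both strings (str.partition); same cost, no part lists built.


-- ===== PORT A =====
-- error_sig.split('|'), pattern_sig.split('|'); length check; loop over zip with early False.
def signature_matches_py (error_sig : String) (pattern_sig : String) : Bool :=
  let error_parts := PySem.Chars.splitOn error_sig.toList ['|']
  let pattern_parts := PySem.Chars.splitOn pattern_sig.toList ['|']
  if error_parts.length ≠ pattern_parts.length then false
  else (error_parts.zip pattern_parts).all (fun x => x.2 == ['*'] || x.1 == x.2)

-- ===== PORT B =====
-- Source B's while loop over (e, p): each round partitions off one segment of each string;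
-- str.partition('|') is takeWhile / dropWhile at the first '|'.
def sigAltGo (e p : List Char) : Bool :=
  let eseg := e.takeWhile (fun c => c != '|')
  let pseg := p.takeWhile (fun c => c != '|')
  if pseg ≠ ['*'] ∧ eseg ≠ pseg then false
  else
    match he : e.dropWhile (fun c => c != '|'), hp : p.dropWhile (fun c => c != '|') with
    | [], [] => true
    | _ :: e', _ :: p' => sigAltGo e' p'
    | [], _ :: _ => false
    | _ :: _, [] => false
termination_by e.length
decreasing_by
  have h := List.length_dropWhile_le (fun c => c != '|') e
  simp [he] at h
  omega

def signature_matches_py_alt (error_sig : String) (pattern_sig : String) : Bool :=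
  sigAltGo error_sig.toList pattern_sig.toList

-- ===== PRECONDITION & SPEC =====
def Spec_signature_matches_py (error_sig : String) (pattern_sig : String) (out : Bool) : Prop := out = signature_matches_py_alt error_sig pattern_sig
instance (error_sig : String) (pattern_sig : String) (out : Bool) : Decidable (Spec_signature_matches_py error_sig pattern_sig out) := by unfold Spec_signature_matches_py; infer_instance

-- ===== CLAIM (what is proved, stated in full; the proofs are below) =====
def Claim_equal_signature_matches_py : Prop := ∀ (error_sig : String) (pattern_sig : String), Dom_signature_matches_py error_sig pattern_sig → Spec_signature_matches_py error_sig pattern_sig (signature_matches_py error_sig pattern_sig)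

-- ===== LEMMAS AND PROOFS =====

-- A structural form of split-on-'|': head segment, then recurse past the first '|'.
def mySplit (l : List Char) : List (List Char) :=
  l.takeWhile (fun c => c != '|') ::
    (match hl : l.dropWhile (fun c => c != '|') with
     | [] => []
     | _ :: rest => mySplit rest)
termination_by l.length
decreasing_by
  have h := List.length_dropWhile_le (fun c => c != '|') l
  simp [hl] at h
  omega

lemma mySplit_ne_nil (l : List Char) : mySplit l ≠ [] := by
  rw [mySplit.eq_def]; simp

lemma go_spec (fuel : Nat) (l cur : List Char) (accs : List (List Char))
    (h : l.length < fuel) :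
    PySem.Chars.splitOn.go ['|'] fuel l cur accs =
      accs.reverse ++ (cur.reverse ++ l.takeWhile (fun c => c != '|')) ::
        (match l.dropWhile (fun c => c != '|') with
         | [] => []
         | _ :: rest => mySplit rest) := by
  induction fuel generalizing l cur accs with
  | zero => omega
  | succ fuel ih =>
    cases l with
    | nil =>
      rw [PySem.Chars.splitOn.go]
      simp
      omega
    | cons c rest =>
      rw [PySem.Chars.splitOn.go]
      have hlt : rest.length < fuel := by simp at h; omega
      by_cases hc : c = '|'
      · subst hc
        rw [if_pos (by simp [List.isPrefixOf])]
        rw [show List.drop ['|'].length ('|' :: rest) = rest from rfl]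
        rw [ih rest [] (cur.reverse :: accs) hlt]
        have ht : List.takeWhile (fun c => c != '|') ('|' :: rest) = [] := by simp
        have hd : List.dropWhile (fun c => c != '|') ('|' :: rest) = '|' :: rest := by simp
        conv_rhs => rw [ht, hd]
        show _ = accs.reverse ++ (cur.reverse ++ ([] : List Char)) :: mySplit rest
        rw [mySplit.eq_def]
        simp
        cases List.dropWhile (fun c => c != '|') rest <;> rfl
      · rw [if_neg (by simp [List.isPrefixOf]; exact fun h => hc h.symm)]
        rw [ih rest (c :: cur) accs hlt]
        have hcb : (c != '|') = true := by simp [hc]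
        have ht : List.takeWhile (fun c => c != '|') (c :: rest) =
            c :: List.takeWhile (fun c => c != '|') rest := by simp [hcb]
        have hd : List.dropWhile (fun c => c != '|') (c :: rest) =
            List.dropWhile (fun c => c != '|') rest := by simp [hcb]
        conv_rhs => rw [ht, hd]
        simp

lemma splitOn_eq_mySplit (l : List Char) :
    PySem.Chars.splitOn l ['|'] = mySplit l := by
  rw [PySem.Chars.splitOn, go_spec (l.length+1) l [] [] (by omega), mySplit.eq_def]
  simp only [List.reverse_nil, List.nil_append]
  cases hd : l.dropWhile (fun c => c != '|') <;> simp

lemma match_eq (e p : List Char) :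
    (if (mySplit e).length ≠ (mySplit p).length then false
     else ((mySplit e).zip (mySplit p)).all (fun x => x.2 == ['*'] || x.1 == x.2))
      = sigAltGo e p := by
  fun_induction sigAltGo e p with
  | case1 e p eseg pseg hcond =>
    -- first segments already fail the check
    rw [mySplit.eq_def e, mySplit.eq_def p]
    obtain ⟨h1, h2⟩ := hcond
    have h1' : List.takeWhile (fun c => c != '|') p ≠ ['*'] := h1
    have h2' : List.takeWhile (fun c => c != '|') e ≠ List.takeWhile (fun c => c != '|') p := h2
    simp only [List.zip_cons_cons, List.all_cons]
    have hh : (List.takeWhile (fun c => c != '|') p == ['*'] ||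
        List.takeWhile (fun c => c != '|') e == List.takeWhile (fun c => c != '|') p) = false := by
      simp [h1', h2']
    rw [hh]
    simp only [Bool.false_and]
    exact ite_self false
  | case2 e p eseg pseg hcond he hp =>
    rw [mySplit.eq_def e, mySplit.eq_def p, he, hp]
    simp at hcond ⊢
    tauto
  | case3 e p eseg pseg hcond c e' hd p' he hp ih =>
    rw [mySplit.eq_def e, mySplit.eq_def p, he, hp]
    have hcond' : ¬(List.takeWhile (fun c => c != '|') p ≠ ['*'] ∧
        List.takeWhile (fun c => c != '|') e ≠ List.takeWhile (fun c => c != '|') p) := hcond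
    have hcheck : (List.takeWhile (fun c => c != '|') p == ['*'] ||
        List.takeWhile (fun c => c != '|') e == List.takeWhile (fun c => c != '|') p) = true := by
      rcases not_and_or.mp hcond' with h | h <;> simp at h <;> simp [h]
    simp only [List.zip_cons_cons, List.all_cons, hcheck, Bool.true_and, List.length_cons]
    simpa using ih
  | case4 e p eseg pseg hcond c p' he hp =>
    rw [mySplit.eq_def e, mySplit.eq_def p, he, hp]
    have h0 : (mySplit p').length ≠ 0 := fun hh => mySplit_ne_nil _ (List.length_eq_zero_iff.mp hh)
    simp [h0]
  | case5 e p eseg pseg hcond c e' he hp =>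
    rw [mySplit.eq_def e, mySplit.eq_def p, he, hp]
    have h0 : (mySplit e').length ≠ 0 := fun hh => mySplit_ne_nil _ (List.length_eq_zero_iff.mp hh)
    simp [h0]

-- ===== VERDICT (by name: the statement is the Claim_ definition above) =====
theorem signature_matches_py_spec : Claim_equal_signature_matches_py := by
  intro e p _
  unfold Spec_signature_matches_py signature_matches_py signature_matches_py_alt
  simp only [splitOn_eq_mySplit]
  exact match_eq e.toList p.toList
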